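-- pv_equiv track=rewrite | github.com/yashchellani/Ellipsis-TTC | yash stuff/pairsums-subsequence.py | largestValue
-- ===== SOURCE A (Python) =====
-- import math
--
-- def findProductSum(arr):
--     n = len(arr)
--     # calculating array sum (a1 + a2 ... + an)
--     arraySum = 0
--     for i in range(0, n):
--         arraySum = arraySum + arr[i]
--     arraySumSquared = arraySum ** 2
--     # calcualting a1^2 + a2^2 + ... + an^2
--     individualSquareSum = 0
--     for i in range(0, n):
--         individualSquareSum += arr[i] * arr[i]
--     return int((arraySumSquared -
--             individualSquareSum) / 2)
--
-- def largestValue(arr) :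
--     largestVal = 0
--     #finding all subsequences
--     n = len(arr)
--     # Number of subsequences is (2**n -1)
--     opsize = math.pow(2, n)
--     for counter in range( 1, (int)(opsize)) :
--         subSeq = []
--         for j in range(0, n) :
--             #using bit-shift operation
--             if (counter & (1<<j)) :
--                 subSeq.append(arr[j])
--             #finding this subseq has the biggest value
--             newSum = findProductSum(subSeq)
--
--             if newSum > largestVal:
--                 largestVal = newSum
--                 print (subSeq, newSum)
--             else:
--                 continue
--     return largestVal
-- ===== SOURCE B (Python) =====
-- import math
--
-- def largestValue(arr):
--     # One evaluation per bitmask with scalar sum/sum-of-squares accumulators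
--     # (no partial-subsequence list, no helper re-scans).  Same float formula as A,
--     # so the returned value is identical; A's progress printing is not reproduced.
--     n = len(arr)
--     best = 0
--     for mask in range(1, 2 ** n):
--         s = 0
--         sq = 0
--         for j in range(n):
--             if mask >> j & 1:
--                 v = arr[j]
--                 s += v
--                 sq += v * v
--         val = int((s * s - sq) / 2)
--         if val > best:
--             best = val
--     return best
-- ===== Notes on version B (the rewrite author's own statement) =====
-- stated objective: faster
-- what changed: B evaluates the subsequence value once per bitmask using two scalar accumulators (sum and sum of squares) instead of A's per-bit rebuild of a subsequence list with a helper that re-scans it twice at every bit position, and drops the progress printing (return value unchanged).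
import Mathlib
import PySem

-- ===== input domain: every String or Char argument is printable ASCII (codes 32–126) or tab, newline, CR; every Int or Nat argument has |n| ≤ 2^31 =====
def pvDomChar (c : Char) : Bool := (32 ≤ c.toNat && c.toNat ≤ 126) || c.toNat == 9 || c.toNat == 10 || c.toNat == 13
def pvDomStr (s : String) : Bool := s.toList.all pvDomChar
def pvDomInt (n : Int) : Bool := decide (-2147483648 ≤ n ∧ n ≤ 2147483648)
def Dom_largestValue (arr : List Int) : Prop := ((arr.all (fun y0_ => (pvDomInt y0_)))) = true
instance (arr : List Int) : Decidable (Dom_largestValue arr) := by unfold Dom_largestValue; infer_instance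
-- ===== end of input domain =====

-- B evaluates the same float formula once per bitmask with scalar accumulators instead of
-- rebuilding a list and re-scanning it at every bit position; return values are identical,
-- A's progress printing (a side effect) is not reproduced.

-- ===== PORT A =====
-- Shared primitive used by both ports: Python's  int(x / 2)  for an integer x.
-- CPython converts x to a double (round to nearest, ties to even), halves it exactly,
-- and int() truncates toward zero; this is exact for |x| < 2^1024 (all Dom inputs).
def pyFloatRound (x : Int) : Int :=
  let a := x.natAbs
  if a < 2 ^ 53 then x
  else
    let e := a.log2 + 1 - 53            -- bit length minus 53
    let q := a / 2 ^ e
    let r := a % 2 ^ e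
    let half := 2 ^ (e - 1)
    let q' := if half < r ∨ (r = half ∧ q % 2 = 1) then q + 1 else q
    x.sign * (q' * 2 ^ e : Nat)

def pyIntHalf (x : Int) : Int := (pyFloatRound x).tdiv 2

-- int((arraySum**2 - individualSquareSum) / 2), the two accumulation loops as folds
def findProductSum (arr : List Int) : Int :=
  let arraySum := arr.foldl (fun a x => a + x) 0
  let arraySumSquared := arraySum ^ 2
  let individualSquareSum := arr.foldl (fun a x => a + x * x) 0
  pyIntHalf (arraySumSquared - individualSquareSum)

-- range(1, int(math.pow(2, n)))  is  List.range' 1 (2^n - 1)  (math.pow(2,n) is exact);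
-- counter & (1 << j) ≠ 0  is  counter.testBit j;  arr[j] with 0 ≤ j < len(arr)  is  arr.getD j 0
def largestValue (arr : List Int) : Int :=
  let n := arr.length
  (List.range' 1 (2 ^ n - 1)).foldl
    (fun largestVal counter =>
      ((List.range n).foldl
        (fun (st : List Int × Int) j =>
          let subSeq := if counter.testBit j then st.1 ++ [arr.getD j 0] else st.1
          let newSum := findProductSum subSeq
          (subSeq, if newSum > st.2 then newSum else st.2))
        ([], largestVal)).2)
    0

-- ===== PORT B =====
-- mask >> j & 1  is  (mask >>> j) &&& 1
def largestValue_alt (arr : List Int) : Int :=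
  let n := arr.length
  (List.range' 1 (2 ^ n - 1)).foldl
    (fun best mask =>
      let p := (List.range n).foldl
        (fun (p : Int × Int) j =>
          if (mask >>> j) &&& 1 = 1 then
            (p.1 + arr.getD j 0, p.2 + arr.getD j 0 * arr.getD j 0)
          else p)
        (0, 0)
      let val := pyIntHalf (p.1 * p.1 - p.2)
      if val > best then val else best)
    0

-- ===== PRECONDITION & SPEC =====
def Spec_largestValue (arr : List Int) (out : Int) : Prop := out = largestValue_alt arr
instance (arr : List Int) (out : Int) : Decidable (Spec_largestValue arr out) := by unfold Spec_largestValue; infer_instance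

-- ===== CLAIM (what is proved, stated in full; the proofs are below) =====
def Claim_equal_largestValue : Prop := ∀ (arr : List Int), Dom_largestValue arr → Spec_largestValue arr (largestValue arr)

-- ===== LEMMAS AND PROOFS =====

-- the subsequence selected by the low k bits of the mask c
def subl (arr : List Int) (c k : Nat) : List Int :=
  ((List.range k).filter (fun j => c.testBit j)).map (fun j => arr.getD j 0)

def sumA (l : List Int) : Int := l.foldl (fun a x => a + x) 0
def sqA (l : List Int) : Int := l.foldl (fun a x => a + x * x) 0

lemma findProductSum_eq (l : List Int) :
    findProductSum l = pyIntHalf (sumA l ^ 2 - sqA l) := rfl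

lemma subl_zero (arr : List Int) (c : Nat) : subl arr c 0 = [] := rfl

lemma subl_succ (arr : List Int) (c m : Nat) :
    subl arr c (m + 1) =
      if c.testBit m then subl arr c m ++ [arr.getD m 0] else subl arr c m := by
  unfold subl
  rw [List.range_succ, List.filter_append]
  by_cases h : c.testBit m <;> simp [h]

lemma sumA_append (l : List Int) (x : Int) : sumA (l ++ [x]) = sumA l + x := by
  simp [sumA, List.foldl_append]

lemma sqA_append (l : List Int) (x : Int) : sqA (l ++ [x]) = sqA l + x * x := by
  simp [sqA, List.foldl_append]

-- characterization of A's inner loop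
lemma innerA (arr : List Int) (c : Nat) (L : Int) (m : Nat) :
    (List.range m).foldl
      (fun (st : List Int × Int) j =>
        let subSeq := if c.testBit j then st.1 ++ [arr.getD j 0] else st.1
        let newSum := findProductSum subSeq
        (subSeq, if newSum > st.2 then newSum else st.2))
      ([], L)
    = (subl arr c m,
       (List.range m).foldl
         (fun L j =>
           let v := findProductSum (subl arr c (j + 1))
           if v > L then v else L) L) := by
  induction m with
  | zero => simp [subl_zero]
  | succ m ih =>
      rw [List.range_succ, List.foldl_append, List.foldl_append, ih]
      simp only [List.foldl_cons, List.foldl_nil]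
      rw [subl_succ]

-- characterization of B's inner loop
lemma innerB (arr : List Int) (c : Nat) (m : Nat) :
    (List.range m).foldl
      (fun (p : Int × Int) j =>
        if (c >>> j) &&& 1 = 1 then
          (p.1 + arr.getD j 0, p.2 + arr.getD j 0 * arr.getD j 0)
        else p)
      (0, 0)
    = (sumA (subl arr c m), sqA (subl arr c m)) := by
  induction m with
  | zero => simp [subl_zero, sumA, sqA]
  | succ m ih =>
      rw [List.range_succ, List.foldl_append, ih]
      have hb : ((c >>> m) &&& 1 = 1) ↔ c.testBit m := by
        simp [Nat.testBit, Nat.and_comm]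
      simp only [List.foldl_cons, List.foldl_nil]
      by_cases h : c.testBit m
      · rw [if_pos (hb.mpr h), subl_succ]
        simp [h, sumA_append, sqA_append]
      · rw [if_neg (fun hc => h (hb.mp hc)), subl_succ]
        simp [h]

-- the low j+1 bits of c select the same subsequence as the mask  c % 2^(j+1)
lemma subl_mod (arr : List Int) (c j : Nat) (hj : j + 1 ≤ arr.length) :
    subl arr (c % 2 ^ (j + 1)) arr.length = subl arr c (j + 1) := by
  unfold subl
  congr 1
  obtain ⟨t, ht⟩ : ∃ t, arr.length = (j + 1) + t := ⟨arr.length - (j + 1), by omega⟩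
  rw [ht, List.range_add, List.filter_append]
  have h2 : ((List.range t).map (fun x => (j + 1) + x)).filter
      (fun i => (c % 2 ^ (j + 1)).testBit i) = [] := by
    rw [List.filter_eq_nil_iff]
    intro i hi
    simp only [List.mem_map, List.mem_range] at hi
    obtain ⟨x, _, rfl⟩ := hi
    have hx : ¬ (j + 1 + x < j + 1) := by omega
    simp [Nat.testBit_mod_two_pow, hx]
  rw [h2, List.append_nil]
  apply List.filter_congr
  intro i hi
  simp only [List.mem_range] at hi
  simp [Nat.testBit_mod_two_pow, hi]

def hval (arr : List Int) (c : Nat) : Int := findProductSum (subl arr c arr.length)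

lemma hval_zero (arr : List Int) : hval arr 0 = 0 := by
  have h : subl arr 0 arr.length = [] := by
    unfold subl
    simp [Nat.zero_testBit]
  simp [hval, h, findProductSum, pyIntHalf, pyFloatRound]

-- generic bound lemmas for folds of the shape  a ↦ if v > a then v else a
lemma foldl_mx_ge_init {α : Type} (f : α → Int) (l : List α) (init : Int) :
    init ≤ l.foldl (fun a x => if f x > a then f x else a) init := by
  induction l generalizing init with
  | nil => simp
  | cons y t ih =>
      simp only [List.foldl_cons]
      exact le_trans (by split <;> omega) (ih _)

lemma foldl_mx_ge_mem {α : Type} (f : α → Int) {x : α} {l : List α} (hx : x ∈ l)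
    (init : Int) : f x ≤ l.foldl (fun a x => if f x > a then f x else a) init := by
  induction l generalizing init with
  | nil => cases hx
  | cons y t ih =>
      simp only [List.foldl_cons]
      rcases List.mem_cons.mp hx with rfl | hx'
      · exact le_trans (by split <;> omega) (foldl_mx_ge_init f t _)
      · exact ih hx' _
lemma foldl_mx_le {α : Type} (f : α → Int) (l : List α) (B : Int) :
    ∀ init : Int, init ≤ B → (∀ x ∈ l, f x ≤ B) →
      l.foldl (fun a x => if f x > a then f x else a) init ≤ B := by
  induction l with
  | nil => intro init h0 _; simpa
  | cons y t ih =>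
      intro init h0 h
      simp only [List.foldl_cons]
      refine ih _ ?_ (fun x hx => h x (List.mem_cons_of_mem _ hx))
      have := h y (List.mem_cons_self ..)
      split <;> omega

-- generic bound lemmas for an outer fold whose step only increases the accumulator
lemma foldl_ge_init' {α : Type} (F : Int → α → Int) (h : ∀ a c, a ≤ F a c)
    (l : List α) (init : Int) : init ≤ l.foldl F init := by
  induction l generalizing init with
  | nil => simp
  | cons y t ih => exact le_trans (h init y) (ih _)

lemma foldl_ge_elem' {α : Type} (F : Int → α → Int) (h : ∀ a c, a ≤ F a c)
    (P : α → Int) (hP : ∀ a c, P c ≤ F a c) {c : α} {l : List α} (hc : c ∈ l)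
    (init : Int) : P c ≤ l.foldl F init := by
  induction l generalizing init with
  | nil => cases hc
  | cons y t ih =>
      simp only [List.foldl_cons]
      rcases List.mem_cons.mp hc with rfl | hc'
      · exact le_trans (hP init c) (foldl_ge_init' F h t _)
      · exact ih hc' _

lemma foldl_le' {α : Type} (F : Int → α → Int) (B : Int) {l : List α} {init : Int}
    (hinit : init ≤ B) (h : ∀ a c, a ≤ B → c ∈ l → F a c ≤ B) :
    l.foldl F init ≤ B := by
  induction l generalizing init with
  | nil => simpa
  | cons y t ih =>
      simp only [List.foldl_cons]
      exact ih (h init y hinit (List.mem_cons_self ..))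
        (fun a c ha hc => h a c ha (List.mem_cons_of_mem _ hc))

-- ===== VERDICT (by name: the statement is the Claim_ definition above) =====
theorem largestValue_spec : Claim_equal_largestValue := by
  intro arr _
  unfold Spec_largestValue largestValue largestValue_alt
  set n := arr.length with hn
  -- rewrite both outer folds via the inner-loop characterizations
  have hA : (fun (largestVal : Int) (counter : Nat) =>
      ((List.range n).foldl
        (fun (st : List Int × Int) j =>
          let subSeq := if counter.testBit j then st.1 ++ [arr.getD j 0] else st.1
          let newSum := findProductSum subSeq
          (subSeq, if newSum > st.2 then newSum else st.2))
        ([], largestVal)).2)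
      = (fun L c => (List.range n).foldl
          (fun L j =>
            let v := findProductSum (subl arr c (j + 1))
            if v > L then v else L) L) := by
    funext L c
    rw [innerA]
  have hB : (fun (best : Int) (mask : Nat) =>
      let p := (List.range n).foldl
        (fun (p : Int × Int) j =>
          if (mask >>> j) &&& 1 = 1 then
            (p.1 + arr.getD j 0, p.2 + arr.getD j 0 * arr.getD j 0)
          else p)
        (0, 0)
      let val := pyIntHalf (p.1 * p.1 - p.2)
      if val > best then val else best)
      = (fun best c => if hval arr c > best then hval arr c else best) := by
    funext best c
    simp only [innerB arr c n, hval, findProductSum_eq, ← hn, sq]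
  simp only [hA, hB]
  set cs := List.range' 1 (2 ^ n - 1) with hcs
  have hmem : ∀ c : Nat, c ∈ cs ↔ 1 ≤ c ∧ c < 2 ^ n := by
    intro c
    rw [hcs, List.mem_range'_1]
    have : 1 ≤ 2 ^ n := Nat.one_le_two_pow
    omega
  -- B's fold and its step
  set Bres := cs.foldl (fun best c => if hval arr c > best then hval arr c else best) 0
    with hBres
  set FA : Int → Nat → Int := fun L c =>
    (List.range n).foldl
      (fun L j =>
        let v := findProductSum (subl arr c (j + 1))
        if v > L then v else L) L with hFA
  have hFAmono : ∀ (a : Int) (c : Nat), a ≤ FA a c := fun a c =>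
    foldl_mx_ge_init (fun j => findProductSum (subl arr c (j + 1))) _ a
  set Ares := cs.foldl FA 0 with hAres
  -- A ≤ B
  have hAB : Ares ≤ Bres := by
    refine foldl_le' FA Bres
      (foldl_mx_ge_init (hval arr) cs 0) (fun a c ha hc => ?_)
    refine foldl_mx_le _ _ _ _ ha (fun j hj => ?_)
    have hjn : j + 1 ≤ n := by simpa using List.mem_range.mp hj
    have hsub : findProductSum (subl arr c (j + 1)) = hval arr (c % 2 ^ (j + 1)) := by
      rw [hval, subl_mod arr c j (by omega)]
    rw [hsub]
    rcases Nat.eq_zero_or_pos (c % 2 ^ (j + 1)) with h0 | hpos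
    · rw [h0, hval_zero]
      exact le_trans (by omega) (foldl_mx_ge_init (hval arr) cs 0)
    · have hcn : c < 2 ^ n := ((hmem c).mp hc).2
      have hmlt : c % 2 ^ (j + 1) < 2 ^ n :=
        lt_of_lt_of_le (Nat.mod_lt _ (Nat.two_pow_pos _))
          (Nat.pow_le_pow_right (by omega) hjn)
      exact foldl_mx_ge_mem (hval arr) ((hmem _).mpr ⟨hpos, hmlt⟩) 0
  -- B ≤ A
  have hBA : Bres ≤ Ares := by
    refine foldl_mx_le (hval arr) cs Ares 0 (foldl_ge_init' FA hFAmono cs 0)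
      (fun c hc => ?_)
    obtain ⟨hc1, hc2⟩ := (hmem c).mp hc
    have hn1 : 1 ≤ n := by
      by_contra h
      interval_cases n
      omega
    have hj : n - 1 ∈ List.range n := List.mem_range.mpr (by omega)
    have hstep : ∀ (a : Int) (c' : Nat), hval arr c' ≤ FA a c' := by
      intro a c'
      have h1 : n - 1 + 1 = n := by omega
      have := foldl_mx_ge_mem (fun j => findProductSum (subl arr c' (j + 1))) hj a
      rw [h1] at this
      simpa [hFA, hval, ← hn] using this
    exact foldl_ge_elem' FA hFAmono (fun c' => hval arr c') hstep hc 0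
  omega
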